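-- pv_equiv track=rewrite | github.com/bansakdo/Algorithm | BOJ/Dynamic Programming/Q2579.py | dfs
-- ===== SOURCE A (Python) =====
-- def dfs(steps, stair, now, last_num):
--     if now == last_num - 1:
--         return sum([stair[i] for i in steps])
--
--     score = 0
--     if not (len(steps) >= 2 and (now + 1 - steps[-1]) == (steps[-1] - steps[-2]) == 1):
--         steps.append(now + 1)
--         score = dfs(steps, stair, now + 1, last_num)
--         steps.pop()
--     if now + 2 < last_num:
--         steps.append(now + 2)
--         score = max(score, dfs(steps, stair, now + 2, last_num))
--         steps.pop()
--     return score
-- ===== SOURCE B (Python) =====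
-- def dfs(steps, stair, now, last_num):
--     # Bottom-up DP from the top stair down to `now`, two states per position:
--     # best extra score when any step is allowed ('free') vs. when the previous
--     # move was a single step, so only a double step is allowed ('single').
--     # None means the top cannot be reached from that state.
--     n = last_num
--     if now == n - 1:
--         return sum(stair[i] for i in steps)
--
--     def omax(a, b):
--         if a is None:
--             return b
--         if b is None:
--             return a
--         return max(a, b)
--
--     free1, free2 = 0, None      # free[p+1], free[p+2]
--     single1, single2 = 0, None  # single[p+1], single[p+2]
--     p = n - 2
--     while p > now:
--         up2 = None if free2 is None else stair[p + 2] + free2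
--         up1 = None if single1 is None else stair[p + 1] + single1
--         free1, free2 = omax(up1, up2), free1
--         single1, single2 = up2, single1
--         p -= 1
--
--     # first moves from `now`: only onto an existing stair (<= n-1), and a
--     # single step only if the caller's trail does not end in one
--     just_stepped = len(steps) >= 2 and now + 1 - steps[-1] == steps[-1] - steps[-2] == 1
--     best = None
--     if not just_stepped and now + 1 <= n - 1:
--         up = single1 if steps and steps[-1] == now else free1
--         best = None if up is None else stair[now + 1] + up
--     if now + 2 <= n - 1:
--         up = single2 if steps and steps[-1] == now + 1 else free2
--         best = omax(best, None if up is None else stair[now + 2] + up)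
--     if best is None:
--         return 0
--     return sum(stair[i] for i in steps) + best
-- ===== Notes on version B (the rewrite author's own statement) =====
-- stated objective: alternative
-- what changed: A explores every admissible step sequence by exponential backtracking recursion; B computes the same maximum with a bottom-up dynamic program over stair positions with two rolling states (previous move was / was not a single step). When the goal is ahead (now < last_num), Pre_ restricts to the problem's natural domain: nonnegative stair scores (on negative scores A's internal score=0 default can leak into the result) and every index a run reads in range (A raises IndexError otherwise; the in-range condition is slightly narrower than A's raising set).
-- outside the precondition, e.g. on dfs([], [0, -1, -3], -2, 3): A returns 0, B returns -3; on dfs([2, 3], [4, 6], 3, 5): A returns 0, B returns 0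
import Mathlib
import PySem

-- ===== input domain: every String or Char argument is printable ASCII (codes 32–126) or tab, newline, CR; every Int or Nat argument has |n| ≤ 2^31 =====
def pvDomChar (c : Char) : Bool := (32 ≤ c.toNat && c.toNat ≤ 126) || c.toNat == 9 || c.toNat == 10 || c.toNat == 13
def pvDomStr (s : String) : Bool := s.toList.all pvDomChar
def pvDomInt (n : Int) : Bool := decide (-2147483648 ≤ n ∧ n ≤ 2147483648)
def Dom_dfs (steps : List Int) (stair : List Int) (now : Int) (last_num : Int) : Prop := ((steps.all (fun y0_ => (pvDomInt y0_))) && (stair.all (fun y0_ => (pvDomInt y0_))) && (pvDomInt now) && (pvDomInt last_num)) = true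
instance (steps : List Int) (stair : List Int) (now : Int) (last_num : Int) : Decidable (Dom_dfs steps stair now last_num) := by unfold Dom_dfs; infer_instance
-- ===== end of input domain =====

-- B replaces A's backtracking branching recursion by a bottom-up two-state DP over the
-- stair positions (objective: alternative). A mutates `steps` but restores it before
-- returning (append/pop balanced), so callers observe no change.

-- ===== PORT A =====
-- stair[i] / steps[-1] / steps[-2]: total lookup with default 0; every index either
-- is guarded by a length test in the source or lies in range by Pre_ (IndexError excluded).
def idx0 (stair : List Int) (i : Int) : Int := PySem.List.pyGetD stair i 0
def tail1 (l : List Int) : Int := PySem.List.pyGetD l (-1) 0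
def tail2 (l : List Int) : Int := PySem.List.pyGetD l (-2) 0

-- termination helpers for A's recursion (cited in decreasing_by)
def creditA (steps : List Int) (now : Int) : Nat :=
  if 2 ≤ steps.length ∧ now + 1 - tail1 steps = tail1 steps - tail2 steps ∧ tail1 steps - tail2 steps = 1 then 0
  else if steps ≠ [] ∧ tail1 steps = now then 1 else 2
def muA (steps : List Int) (now last_num : Int) : Nat :=
  3 * (last_num - now).toNat + creditA steps now

theorem tail1_app (l : List Int) (x : Int) : tail1 (l ++ [x]) = x := by
  simp [tail1, PySem.List.pyGetD_neg_one_append_singleton]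

theorem tail2_app (l : List Int) (x : Int) (h : l ≠ []) : tail2 (l ++ [x]) = tail1 l := by
  have hl : 1 ≤ l.length := List.length_pos_iff.mpr h
  rw [tail2, PySem.List.pyGetD_neg_ofNat (l ++ [x]) 2 0 (by omega)
    (by simp only [List.length_append, List.length_cons, List.length_nil]; omega)]
  rw [tail1, PySem.List.pyGetD_neg_one l 0 h]
  have e : (l ++ [x]).length - 2 = l.length - 1 := by
    simp only [List.length_append, List.length_cons, List.length_nil]; omega
  simp only [e]
  rw [List.getElem_append_left (by omega), List.getLast_eq_getElem]

theorem creditA_dec (steps : List Int) (now : Int)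
    (h : ¬ (2 ≤ steps.length ∧ now + 1 - tail1 steps = tail1 steps - tail2 steps ∧ tail1 steps - tail2 steps = 1)) :
    creditA (steps ++ [now + 1]) (now + 1) < creditA steps now := by
  rcases eq_or_ne steps [] with rfl | hne
  · simp [creditA, show tail1 [now + 1] = now + 1 from tail1_app [] _]
  · have hlen : 1 ≤ steps.length := List.length_pos_iff.mpr hne
    have hne2 : steps ++ [now + 1] ≠ [] := by simp
    unfold creditA
    rw [tail1_app, tail2_app steps (now + 1) hne]
    simp only [hne2, hne, ne_eq, not_false_eq_true, true_and,
      List.length_append, List.length_cons, List.length_nil]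
    split_ifs <;> omega

theorem muA_dec1 (steps : List Int) (now last_num : Int)
    (h : ¬ (2 ≤ steps.length ∧ now + 1 - tail1 steps = tail1 steps - tail2 steps ∧ tail1 steps - tail2 steps = 1)) :
    muA (steps ++ [now + 1]) (now + 1) last_num < muA steps now last_num := by
  have hd := creditA_dec steps now h
  unfold muA; omega

theorem muA_dec2 (steps : List Int) (now last_num : Int) (h : now + 2 < last_num) :
    muA (steps ++ [now + 2]) (now + 2) last_num < muA steps now last_num := by
  have h1 : creditA (steps ++ [now + 2]) (now + 2) ≤ 2 := by unfold creditA; split_ifs <;> omega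
  unfold muA; omega

def dfs (steps : List Int) (stair : List Int) (now : Int) (last_num : Int) : Int :=
  if now = last_num - 1 then
    (steps.map (fun i => idx0 stair i)).sum
  else
    let score : Int := 0
    let score :=
      if h : ¬ (2 ≤ steps.length ∧ now + 1 - tail1 steps = tail1 steps - tail2 steps ∧ tail1 steps - tail2 steps = 1)
      then dfs (steps ++ [now + 1]) stair (now + 1) last_num
      else score
    if h2 : now + 2 < last_num then
      max score (dfs (steps ++ [now + 2]) stair (now + 2) last_num)
    else score
termination_by muA steps now last_num
decreasing_by
  · exact muA_dec1 steps now last_num h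
  · exact muA_dec2 steps now last_num h2

-- ===== PORT B =====
-- transliteration of Source B: bottom-up rolling DP; `none` = the top is unreachable
-- from that state (Source B's None); omaxB is Source B's omax.
def omaxB (a b : Option Int) : Option Int :=
  match a, b with
  | none, b => b
  | some a, none => some a
  | some a, some b => some (max a b)

-- the `while p > now` loop, fuel = its iteration count; state (free1, free2, single1, single2)
def bloop2 (stair : List Int) (p : Int) (fuel : Nat) (f1 f2 s1 s2 : Option Int) :
    Option Int × Option Int × Option Int × Option Int :=
  match fuel with
  | 0 => (f1, f2, s1, s2)
  | f + 1 =>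
    let up2 := f2.map (fun v => idx0 stair (p + 2) + v)
    let up1 := s1.map (fun v => idx0 stair (p + 1) + v)
    bloop2 stair (p - 1) f (omaxB up1 up2) f1 up2 s1

def dfs_alt (steps : List Int) (stair : List Int) (now : Int) (last_num : Int) : Int :=
  if now = last_num - 1 then
    (steps.map (fun i => idx0 stair i)).sum
  else
    let st := bloop2 stair (last_num - 2) (last_num - 2 - now).toNat (some 0) none (some 0) none
    let best : Option Int :=
      if (¬ (2 ≤ steps.length ∧ now + 1 - tail1 steps = tail1 steps - tail2 steps ∧ tail1 steps - tail2 steps = 1))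
         ∧ now + 1 ≤ last_num - 1
      then (if steps ≠ [] ∧ tail1 steps = now then st.2.2.1 else st.1).map
             (fun v => idx0 stair (now + 1) + v)
      else none
    let best :=
      if now + 2 ≤ last_num - 1 then
        omaxB best ((if steps ≠ [] ∧ tail1 steps = now + 1 then st.2.2.2 else st.2.1).map
          (fun v => idx0 stair (now + 2) + v))
      else best
    match best with
    | none => 0
    | some b => (steps.map (fun i => idx0 stair i)).sum + b

-- ===== PRECONDITION & SPEC =====
-- When the goal is still ahead (now < last_num), Pre_ restricts to the problem's
-- natural domain: nonnegative stair scores (the BOJ 2579 domain; on negative scores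
-- A's internal score=0 default can leak into the result) and every index a run can
-- read in range (A raises IndexError otherwise; the in-range condition is slightly
-- narrower than A's raising set — see claim.json cites).
def Pre_dfs (steps : List Int) (stair : List Int) (now : Int) (last_num : Int) : Prop :=
  now < last_num →
    (∀ i ∈ steps, -(stair.length : Int) ≤ i ∧ i < (stair.length : Int)) ∧
    (now + 2 ≤ last_num →
      (-(stair.length : Int) ≤ now + 1 ∧ last_num ≤ (stair.length : Int)) ∧
      (∀ x ∈ stair, 0 ≤ x))
instance (steps : List Int) (stair : List Int) (now : Int) (last_num : Int) : Decidable (Pre_dfs steps stair now last_num) := by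
  unfold Pre_dfs; infer_instance

def pvWitness_dfs : List Int × List Int × Int × Int := ([], [10, 20, 15, 25, 10, 20], -1, 6)

def Spec_dfs (steps : List Int) (stair : List Int) (now : Int) (last_num : Int) (out : Int) : Prop := out = dfs_alt steps stair now last_num
instance (steps : List Int) (stair : List Int) (now : Int) (last_num : Int) (out : Int) : Decidable (Spec_dfs steps stair now last_num out) := by unfold Spec_dfs; infer_instance

-- ===== CLAIM (what is proved, stated in full; the proofs are below) =====
def Claim_equal_dfs : Prop := ∀ (steps : List Int) (stair : List Int) (now : Int) (last_num : Int), Dom_dfs steps stair now last_num → Pre_dfs steps stair now last_num → Spec_dfs steps stair now last_num (dfs steps stair now last_num)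

-- ===== LEMMAS AND PROOFS =====

-- proof-side characterisation of A: a DP over positions on cells
-- (best extra score | none, "a score=0 default was hit" flag)
abbrev BCell : Type := Option Int × Bool
abbrev BRow : Type := BCell × BCell   -- (free state, single-step-forbidden state)

def bshift (c : BCell) (w : Int) : BCell := (c.1.map (· + w), c.2)

def bmerge (c d : BCell) : BCell :=
  (match c.1, d.1 with
   | none, b => b
   | some a, none => some a
   | some a, some b => some (max a b), c.2 || d.2)

def bstep (stair : List Int) (pos : Int) (r1 : BRow) (r2 : Option BRow) : BRow :=
  let up1 := bshift r1.2 (idx0 stair (pos + 1))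
  match r2 with
  | none => (up1, (none, true))
  | some r => let up2 := bshift r.1 (idx0 stair (pos + 2))
              (bmerge up1 up2, bmerge (none, true) up2)

def bloop (stair : List Int) (pos : Int) (fuel : Nat) (r1 : BRow) (r2 : Option BRow) : BRow × Option BRow :=
  match fuel with
  | 0 => (r1, r2)
  | f + 1 => bloop stair (pos - 1) f (bstep stair pos r1 r2) (some r1)

-- the full flagged DP evaluation of A (proved equal to dfs below, then collapsed
-- to dfs_alt under Pre_'s nonnegativity)
def dfsC (steps : List Int) (stair : List Int) (now : Int) (last_num : Int) : Int :=
  if now = last_num - 1 then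
    (steps.map (fun i => idx0 stair i)).sum
  else if last_num ≤ now then 0
  else
    let p := bloop stair (last_num - 2) (last_num - 2 - now).toNat ((some 0, false), (some 0, false)) none
    let row1 := p.1
    let row2 := p.2
    let c : BCell :=
      if 2 ≤ steps.length ∧ now + 1 - tail1 steps = tail1 steps - tail2 steps ∧ tail1 steps - tail2 steps = 1
      then (none, true)
      else bshift (if steps ≠ [] ∧ tail1 steps = now then row1.2 else row1.1) (idx0 stair (now + 1))
    let c := match row2 with
      | none => c
      | some r2 => bmerge c (bshift (if steps ≠ [] ∧ tail1 steps = now + 1 then r2.2 else r2.1) (idx0 stair (now + 2)))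
    let pre := (steps.map (fun i => idx0 stair i)).sum
    match c.1 with
    | some b => if c.2 then max (pre + b) 0 else pre + b
    | none => 0

def evalC (P : Int) (c : BCell) : Int :=
  match c.1 with
  | some b => if c.2 then max (P + b) 0 else P + b
  | none => 0

def inhC (c : BCell) : Prop := c.1 ≠ none ∨ c.2 = true

theorem evalC_bshift (P w : Int) (c : BCell) : evalC P (bshift c w) = evalC (P + w) c := by
  obtain ⟨o, z⟩ := c; cases o <;> cases z <;> simp [evalC, bshift] <;> omega

theorem inhC_bshift (c : BCell) (w : Int) (h : inhC c) : inhC (bshift c w) := by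
  obtain ⟨o, z⟩ := c; cases o <;> cases z <;> simp_all [inhC, bshift]

theorem inhC_bmerge_left (c d : BCell) (h : inhC c) : inhC (bmerge c d) := by
  obtain ⟨o, z⟩ := c; obtain ⟨o2, z2⟩ := d
  cases o <;> cases o2 <;> cases z <;> cases z2 <;> simp_all [inhC, bmerge]

theorem evalC_bmerge (P : Int) (c d : BCell) (hc : inhC c) (hd : inhC d) :
    evalC P (bmerge c d) = max (evalC P c) (evalC P d) := by
  obtain ⟨o, z⟩ := c; obtain ⟨o2, z2⟩ := d
  cases o <;> cases o2 <;> cases z <;> cases z2 <;>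
    simp_all [inhC, evalC, bmerge] <;> omega

-- the DP table: rowF k = row of the backward DP at position n-1-k
def rowF (stair : List Int) (n : Int) : Nat → BRow
  | 0 => ((some 0, false), (some 0, false))
  | 1 => bstep stair (n - 2) (rowF stair n 0) none
  | (k + 2) => bstep stair (n - 1 - ((k : Int) + 2)) (rowF stair n (k + 1)) (some (rowF stair n k))

theorem rowF_succ (stair : List Int) (n : Int) (k : Nat) :
    rowF stair n (k + 1) =
      bstep stair (n - 1 - ((k : Int) + 1)) (rowF stair n k)
        (if k = 0 then none else some (rowF stair n (k - 1))) := by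
  cases k with
  | zero =>
    have h : n - 1 - ((0 : Nat) + 1 : Int) = n - 2 := by push_cast; ring
    rw [h]; rfl
  | succ m =>
    have h : n - 1 - (((m + 1 : Nat) : Int) + 1) = n - 1 - ((m : Int) + 2) := by push_cast; ring
    rw [h]; rfl

theorem rowF_inh (stair : List Int) (n : Int) (k : Nat) :
    inhC (rowF stair n k).1 ∧ inhC (rowF stair n k).2 := by
  induction k using Nat.strong_induction_on with
  | _ k ih =>
    match k with
    | 0 => exact ⟨Or.inl (by simp [rowF]), Or.inl (by simp [rowF])⟩
    | 1 => exact ⟨Or.inl (by simp [rowF, bstep, bshift]), Or.inr (by simp [rowF, bstep])⟩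
    | (m + 2) =>
      have i1 := ih (m + 1) (by omega)
      simp only [rowF, bstep]
      exact ⟨inhC_bmerge_left _ _ (inhC_bshift _ _ i1.2),
             inhC_bmerge_left _ _ (Or.inr rfl)⟩

theorem bloop_eq (stair : List Int) (n : Int) :
    ∀ (f k : Nat),
      bloop stair (n - 1 - ((k : Int) + 1)) f (rowF stair n k)
          (if k = 0 then none else some (rowF stair n (k - 1)))
        = (rowF stair n (k + f), if k + f = 0 then none else some (rowF stair n (k + f - 1))) := by
  intro f
  induction f with
  | zero => intro k; simp [bloop]
  | succ f ih =>
    intro k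
    simp only [bloop]
    rw [← rowF_succ stair n k]
    have e1 : n - 1 - ((k : Int) + 1) - 1 = n - 1 - (((k + 1 : Nat) : Int) + 1) := by push_cast; ring
    have e2 : some (rowF stair n k) = (if k + 1 = 0 then none else some (rowF stair n (k + 1 - 1))) := by simp
    rw [e1, e2, ih (k + 1)]
    have e3 : k + 1 + f = k + (f + 1) := by omega
    rw [e3]

theorem prefix_app (stair l : List Int) (x : Int) :
    ((l ++ [x]).map (fun i => idx0 stair i)).sum = (l.map (fun i => idx0 stair i)).sum + idx0 stair x := by
  simp

-- heart of the A-side proof: inside the recursion (top of `steps` = current position),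
-- A's branching value is the DP cell selected by the "last move was +1" bit
theorem dfs_eq_rowF (stair : List Int) (n : Int) :
    ∀ (k : Nat) (steps : List Int), steps ≠ [] → tail1 steps = n - 1 - (k : Int) →
      dfs steps stair (n - 1 - (k : Int)) n =
        evalC ((steps.map (fun i => idx0 stair i)).sum)
          (if 2 ≤ steps.length ∧ tail2 steps = n - 1 - (k : Int) - 1
           then (rowF stair n k).2 else (rowF stair n k).1) := by
  intro k
  induction k using Nat.strong_induction_on with
  | _ k ih =>
    intro steps hne htail
    have hlen : 1 ≤ steps.length := List.length_pos_iff.mpr hne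
    cases k with
    | zero =>
      have e0 : n - 1 - ((0 : Nat) : Int) = n - 1 := by push_cast; ring
      rw [e0] at htail ⊢
      rw [dfs, if_pos rfl]
      split_ifs <;> simp [rowF, evalC]
    | succ m =>
      cases m with
      | zero =>
        have hpos : ¬ (n - 1 - ((0 + 1 : Nat) : Int) = n - 1) := by push_cast; omega
        rw [dfs, if_neg hpos]
        have hGiff : (2 ≤ steps.length ∧
              n - 1 - ((0 + 1 : Nat) : Int) + 1 - tail1 steps = tail1 steps - tail2 steps ∧
              tail1 steps - tail2 steps = 1) ↔
            (2 ≤ steps.length ∧ tail2 steps = n - 1 - ((0 + 1 : Nat) : Int) - 1) := by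
          rw [htail]
          constructor
          · rintro ⟨a, b, c⟩; exact ⟨a, by omega⟩
          · rintro ⟨a, b⟩; exact ⟨a, by omega, by omega⟩
        have hne1 : steps ++ [n - 1 - ((0 + 1 : Nat) : Int) + 1] ≠ [] := by simp
        have ht1 : tail1 (steps ++ [n - 1 - ((0 + 1 : Nat) : Int) + 1]) = n - 1 - ((0 : Nat) : Int) := by
          rw [tail1_app]; omega
        have hc1 := ih 0 (by omega) _ hne1 ht1
        rw [if_pos ⟨by simp only [List.length_append, List.length_cons, List.length_nil]; omega,
              by rw [tail2_app _ _ hne, htail]; omega⟩, prefix_app] at hc1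
        rw [show (n - 1 - ((0 : Nat) : Int)) = n - 1 - ((0 + 1 : Nat) : Int) + 1 by omega] at hc1
        have h2 : ¬ (n - 1 - ((0 + 1 : Nat) : Int) + 2 < n) := by push_cast; omega
        rw [dif_neg h2]
        by_cases hG : 2 ≤ steps.length ∧ tail2 steps = n - 1 - ((0 + 1 : Nat) : Int) - 1
        · rw [dif_neg (not_not_intro (hGiff.mpr hG)), if_pos hG]
          simp [rowF, bstep, evalC]
        · rw [dif_pos (fun hc => hG (hGiff.mp hc)), if_neg hG, hc1]
          have e1 : n - 2 + 1 = n - 1 - ((0 + 1 : Nat) : Int) + 1 := by push_cast; ring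
          show _ = evalC _ (bstep stair (n - 2) (rowF stair n 0) none).1
          simp only [bstep]
          rw [e1, evalC_bshift]
      | succ m' =>
        have hpos : ¬ (n - 1 - ((m' + 1 + 1 : Nat) : Int) = n - 1) := by push_cast; omega
        rw [dfs, if_neg hpos]
        have hGiff : (2 ≤ steps.length ∧
              n - 1 - ((m' + 1 + 1 : Nat) : Int) + 1 - tail1 steps = tail1 steps - tail2 steps ∧
              tail1 steps - tail2 steps = 1) ↔
            (2 ≤ steps.length ∧ tail2 steps = n - 1 - ((m' + 1 + 1 : Nat) : Int) - 1) := by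
          rw [htail]
          constructor
          · rintro ⟨a, b, c⟩; exact ⟨a, by omega⟩
          · rintro ⟨a, b⟩; exact ⟨a, by omega, by omega⟩
        have hne1 : steps ++ [n - 1 - ((m' + 1 + 1 : Nat) : Int) + 1] ≠ [] := by simp
        have ht1 : tail1 (steps ++ [n - 1 - ((m' + 1 + 1 : Nat) : Int) + 1]) = n - 1 - ((m' + 1 : Nat) : Int) := by
          rw [tail1_app]; omega
        have hc1 := ih (m' + 1) (by omega) _ hne1 ht1
        rw [if_pos ⟨by simp only [List.length_append, List.length_cons, List.length_nil]; omega,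
              by rw [tail2_app _ _ hne, htail]; omega⟩, prefix_app] at hc1
        rw [show (n - 1 - ((m' + 1 : Nat) : Int)) = n - 1 - ((m' + 1 + 1 : Nat) : Int) + 1 by omega] at hc1
        have h2 : (n - 1 - ((m' + 1 + 1 : Nat) : Int) + 2 < n) := by push_cast; omega
        rw [dif_pos h2]
        have hne2 : steps ++ [n - 1 - ((m' + 1 + 1 : Nat) : Int) + 2] ≠ [] := by simp
        have ht2 : tail1 (steps ++ [n - 1 - ((m' + 1 + 1 : Nat) : Int) + 2]) = n - 1 - (m' : Int) := by
          rw [tail1_app]; push_cast; ring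
        have hc2 := ih m' (by omega) _ hne2 ht2
        rw [if_neg (by
              rintro ⟨-, hb⟩
              rw [tail2_app _ _ hne, htail] at hb
              push_cast at hb; omega), prefix_app] at hc2
        rw [show (n - 1 - (m' : Int)) = n - 1 - ((m' + 1 + 1 : Nat) : Int) + 2 by push_cast; ring] at hc2
        show _ = evalC _
          (if 2 ≤ steps.length ∧ tail2 steps = n - 1 - ((m' + 1 + 1 : Nat) : Int) - 1
           then (bstep stair (n - 1 - ((m' : Int) + 2)) (rowF stair n (m' + 1)) (some (rowF stair n m'))).2
           else (bstep stair (n - 1 - ((m' : Int) + 2)) (rowF stair n (m' + 1)) (some (rowF stair n m'))).1)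
        simp only [bstep]
        have e1 : n - 1 - ((m' : Int) + 2) + 1 = n - 1 - ((m' + 1 + 1 : Nat) : Int) + 1 := by
          push_cast; ring
        have e2 : n - 1 - ((m' : Int) + 2) + 2 = n - 1 - ((m' + 1 + 1 : Nat) : Int) + 2 := by
          push_cast; ring
        rw [e1, e2]
        have iup1 : inhC (bshift (rowF stair n (m' + 1)).2 (idx0 stair (n - 1 - ((m' + 1 + 1 : Nat) : Int) + 1))) :=
          inhC_bshift _ _ (rowF_inh stair n (m' + 1)).2
        have iup2 : inhC (bshift (rowF stair n m').1 (idx0 stair (n - 1 - ((m' + 1 + 1 : Nat) : Int) + 2))) :=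
          inhC_bshift _ _ (rowF_inh stair n m').1
        by_cases hG : 2 ≤ steps.length ∧ tail2 steps = n - 1 - ((m' + 1 + 1 : Nat) : Int) - 1
        · rw [dif_neg (not_not_intro (hGiff.mpr hG)), if_pos hG]
          rw [evalC_bmerge _ _ _ (Or.inr rfl) iup2, evalC_bshift, ← hc2]
          simp [evalC]
        · rw [dif_pos (fun hc => hG (hGiff.mp hc)), if_neg hG]
          rw [evalC_bmerge _ _ _ iup1 iup2, evalC_bshift, evalC_bshift, ← hc1, ← hc2]

theorem dfs_overshoot (stair : List Int) (n : Int) :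
    ∀ (c : Nat) (steps : List Int) (now : Int), creditA steps now = c → n ≤ now →
      dfs steps stair now n = 0 := by
  intro c
  induction c using Nat.strong_induction_on with
  | _ c ih =>
    intro steps now hc hn
    rw [dfs]
    have h1 : ¬ (now = n - 1) := by omega
    have h2 : ¬ (now + 2 < n) := by omega
    simp only [h1, if_false, dif_neg h2]
    by_cases hp : (2 ≤ steps.length ∧ now + 1 - tail1 steps = tail1 steps - tail2 steps ∧ tail1 steps - tail2 steps = 1)
    · rw [dif_neg (not_not_intro hp)]
    · rw [dif_pos hp]
      exact ih (creditA (steps ++ [now + 1]) (now + 1))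
        (by have := creditA_dec steps now hp; omega) _ _ rfl (by omega)

theorem dfs_eq_dfsC (steps stair : List Int) (now last_num : Int) :
    dfs steps stair now last_num = dfsC steps stair now last_num := by
  by_cases h1 : now = last_num - 1
  · rw [dfs, dfsC, if_pos h1, if_pos h1]
  by_cases h2 : last_num ≤ now
  · rw [dfsC, if_neg h1, if_pos h2]
    exact dfs_overshoot stair last_num (creditA steps now) steps now rfl h2
  have hnow : now ≤ last_num - 2 := by omega
  set f : Nat := (last_num - 2 - now).toNat with hf
  have hcast : ((f : Nat) : Int) = last_num - 2 - now := Int.toNat_of_nonneg (by omega)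
  have hb := bloop_eq stair last_num f 0
  rw [show last_num - 1 - (((0 : Nat) : Int) + 1) = last_num - 2 by push_cast; ring,
      show rowF stair last_num 0 = ((some 0, false), (some 0, false)) from rfl] at hb
  norm_num at hb
  rw [dfsC, if_neg h1, if_neg h2]
  simp only [← hf, hb]
  have hc1 := dfs_eq_rowF stair last_num f (steps ++ [now + 1]) (by simp)
    (by rw [tail1_app]; omega)
  rw [show last_num - 1 - ((f : Nat) : Int) = now + 1 by omega] at hc1
  rw [prefix_app] at hc1
  have sel1 : (2 ≤ (steps ++ [now + 1]).length ∧ tail2 (steps ++ [now + 1]) = now + 1 - 1) ↔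
      (steps ≠ [] ∧ tail1 steps = now) := by
    rcases eq_or_ne steps [] with rfl | hs
    · simp
    · rw [tail2_app _ _ hs]
      have : 1 ≤ steps.length := List.length_pos_iff.mpr hs
      simp only [List.length_append, List.length_cons, List.length_nil, hs, ne_eq,
        not_false_eq_true, true_and]
      constructor
      · rintro ⟨-, b⟩; omega
      · intro b; exact ⟨by omega, by omega⟩
  rw [if_congr sel1 rfl rfl] at hc1
  by_cases hf0 : f = 0
  · have h2c : ¬ (now + 2 < last_num) := by omega
    simp only [hf0, reduceIte]
    rw [hf0] at hc1
    rw [dfs, if_neg h1, dif_neg h2c]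
    by_cases hG : 2 ≤ steps.length ∧ now + 1 - tail1 steps = tail1 steps - tail2 steps ∧
        tail1 steps - tail2 steps = 1
    · rw [dif_neg (not_not_intro hG), if_pos hG]
    · rw [dif_pos hG, if_neg hG, hc1]
      show _ = evalC ((List.map (fun i => idx0 stair i) steps).sum)
        (bshift (if steps ≠ [] ∧ tail1 steps = now
                 then (rowF stair last_num 0).2 else (rowF stair last_num 0).1)
                (idx0 stair (now + 1)))
      rw [evalC_bshift]
  · have h2c : now + 2 < last_num := by omega
    simp only [if_neg hf0]
    rw [dfs, if_neg h1, dif_pos h2c]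
    have hcast1 : ((f - 1 : Nat) : Int) = last_num - 3 - now := by omega
    have hc2 := dfs_eq_rowF stair last_num (f - 1) (steps ++ [now + 2]) (by simp)
      (by rw [tail1_app]; omega)
    rw [show last_num - 1 - ((f - 1 : Nat) : Int) = now + 2 by omega] at hc2
    rw [prefix_app] at hc2
    have sel2 : (2 ≤ (steps ++ [now + 2]).length ∧ tail2 (steps ++ [now + 2]) = now + 2 - 1) ↔
        (steps ≠ [] ∧ tail1 steps = now + 1) := by
      rcases eq_or_ne steps [] with rfl | hs
      · simp
      · rw [tail2_app _ _ hs]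
        have : 1 ≤ steps.length := List.length_pos_iff.mpr hs
        simp only [List.length_append, List.length_cons, List.length_nil, hs, ne_eq,
          not_false_eq_true, true_and]
        constructor
        · rintro ⟨-, b⟩; omega
        · intro b; exact ⟨by omega, by omega⟩
    rw [if_congr sel2 rfl rfl] at hc2
    have isel2 : inhC (if steps ≠ [] ∧ tail1 steps = now + 1
        then (rowF stair last_num (f - 1)).2 else (rowF stair last_num (f - 1)).1) := by
      split_ifs
      · exact (rowF_inh stair last_num (f - 1)).2
      · exact (rowF_inh stair last_num (f - 1)).1
    have iup2 : inhC (bshift (if steps ≠ [] ∧ tail1 steps = now + 1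
        then (rowF stair last_num (f - 1)).2 else (rowF stair last_num (f - 1)).1)
        (idx0 stair (now + 2))) := inhC_bshift _ _ isel2
    by_cases hG : 2 ≤ steps.length ∧ now + 1 - tail1 steps = tail1 steps - tail2 steps ∧
        tail1 steps - tail2 steps = 1
    · rw [dif_neg (not_not_intro hG), if_pos hG]
      show max 0 _ = evalC ((List.map (fun i => idx0 stair i) steps).sum)
        (bmerge (none, true)
          (bshift (if steps ≠ [] ∧ tail1 steps = now + 1
                   then (rowF stair last_num (f - 1)).2 else (rowF stair last_num (f - 1)).1)
                  (idx0 stair (now + 2))))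
      rw [evalC_bmerge _ _ _ (Or.inr rfl) iup2, evalC_bshift, ← hc2]
      simp [evalC]
    · rw [dif_pos hG, if_neg hG]
      have isel1 : inhC (if steps ≠ [] ∧ tail1 steps = now
          then (rowF stair last_num f).2 else (rowF stair last_num f).1) := by
        split_ifs
        · exact (rowF_inh stair last_num f).2
        · exact (rowF_inh stair last_num f).1
      show max _ _ = evalC ((List.map (fun i => idx0 stair i) steps).sum)
        (bmerge
          (bshift (if steps ≠ [] ∧ tail1 steps = now
                   then (rowF stair last_num f).2 else (rowF stair last_num f).1)
                  (idx0 stair (now + 1)))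
          (bshift (if steps ≠ [] ∧ tail1 steps = now + 1
                   then (rowF stair last_num (f - 1)).2 else (rowF stair last_num (f - 1)).1)
                  (idx0 stair (now + 2))))
      rw [evalC_bmerge _ _ _ (inhC_bshift _ _ isel1) iup2, evalC_bshift, evalC_bshift,
        ← hc1, ← hc2]

-- ===== B-side: the rolling loop computes the projections of the DP rows =====

theorem proj_bmerge (c d : BCell) : (bmerge c d).1 = omaxB c.1 d.1 := by
  obtain ⟨o, z⟩ := c; obtain ⟨o2, z2⟩ := d
  cases o <;> cases o2 <;> rfl

theorem map_add_comm_opt (o : Option Int) (w : Int) :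
    o.map (fun v => w + v) = o.map (· + w) := by
  cases o <;> simp [Int.add_comm]

theorem rowF_proj_succ (stair : List Int) (n : Int) (k : Nat) :
    (rowF stair n (k + 1)).1.1 =
      omaxB (((rowF stair n k).2.1).map (fun v => idx0 stair (n - 1 - ((k : Int) + 1) + 1) + v))
            ((if k = 0 then none else (rowF stair n (k - 1)).1.1).map
              (fun v => idx0 stair (n - 1 - ((k : Int) + 1) + 2) + v)) ∧
    (rowF stair n (k + 1)).2.1 =
      (if k = 0 then none else (rowF stair n (k - 1)).1.1).map
        (fun v => idx0 stair (n - 1 - ((k : Int) + 1) + 2) + v) := by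
  rw [rowF_succ]
  cases k with
  | zero =>
    constructor <;> simp [bstep, bshift, rowF, omaxB, Int.add_comm]
  | succ m =>
    have hk : ¬ (m + 1 = 0) := by omega
    simp only [if_neg hk]
    constructor
    · show (bmerge _ _).1 = _
      rw [proj_bmerge]
      simp only [bshift, map_add_comm_opt]
    · show (bmerge (none, true) _).1 = _
      rw [proj_bmerge]
      simp only [bshift, map_add_comm_opt, omaxB]

theorem bloop2_eq (stair : List Int) (n : Int) :
    ∀ (f k : Nat),
      bloop2 stair (n - 1 - ((k : Int) + 1)) f
          ((rowF stair n k).1.1)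
          (if k = 0 then none else (rowF stair n (k - 1)).1.1)
          ((rowF stair n k).2.1)
          (if k = 0 then none else (rowF stair n (k - 1)).2.1)
        = ((rowF stair n (k + f)).1.1,
           (if k + f = 0 then none else (rowF stair n (k + f - 1)).1.1),
           (rowF stair n (k + f)).2.1,
           (if k + f = 0 then none else (rowF stair n (k + f - 1)).2.1)) := by
  intro f
  induction f with
  | zero => intro k; simp [bloop2]
  | succ f ih =>
    intro k
    simp only [bloop2]
    rw [← (rowF_proj_succ stair n k).1, ← (rowF_proj_succ stair n k).2]
    have e1 : n - 1 - ((k : Int) + 1) - 1 = n - 1 - (((k + 1 : Nat) : Int) + 1) := by push_cast; ring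
    have e2 : (rowF stair n k).1.1 = (if k + 1 = 0 then none else (rowF stair n (k + 1 - 1)).1.1) := by simp
    have e3 : (rowF stair n k).2.1 = (if k + 1 = 0 then none else (rowF stair n (k + 1 - 1)).2.1) := by simp
    rw [e1, e2, e3, ih (k + 1)]
    have e4 : k + 1 + f = k + (f + 1) := by omega
    rw [e4]

-- ===== nonnegativity: Pre_'s nonnegative scores collapse the flagged evaluation =====

def cellNN (c : BCell) : Prop := ∀ b, c.1 = some b → 0 ≤ b

theorem idx0_nonneg (stair : List Int) (h : ∀ x ∈ stair, 0 ≤ x) (j : Int) :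
    0 ≤ idx0 stair j := by
  by_cases hr : PySem.Raise.InRange stair.length j
  · exact h _ (PySem.List.pyGetD_mem stair 0 hr)
  · rw [idx0, PySem.List.pyGetD_of_none stair j 0 ((PySem.List.pyGet?_eq_none_iff stair j).mpr hr)]

theorem cellNN_bshift (c : BCell) (w : Int) (hw : 0 ≤ w) (h : cellNN c) :
    cellNN (bshift c w) := by
  intro b hb
  obtain ⟨o, z⟩ := c
  cases o with
  | none => simp [bshift] at hb
  | some v =>
    simp only [bshift, Option.map_some] at hb
    cases hb
    have := h v rfl
    omega

theorem cellNN_bmerge (c d : BCell) (hc : cellNN c) (hd : cellNN d) :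
    cellNN (bmerge c d) := by
  intro b hb
  obtain ⟨o, z⟩ := c; obtain ⟨o2, z2⟩ := d
  cases o <;> cases o2 <;> simp only [bmerge] at hb
  · cases hb
  · exact hd _ hb
  · exact hc _ hb
  · cases hb
    have h1 := hc _ rfl
    have h2 := hd _ rfl
    simp only [le_max_iff]
    omega

theorem cellNN_zero : cellNN ((some 0 : Option Int), false) := by
  intro b hb; cases hb; omega

theorem rowF_NN (stair : List Int) (n : Int) (h : ∀ x ∈ stair, 0 ≤ x) (k : Nat) :
    cellNN (rowF stair n k).1 ∧ cellNN (rowF stair n k).2 := by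
  have hw := idx0_nonneg stair h
  induction k using Nat.strong_induction_on with
  | _ k ih =>
    match k with
    | 0 => exact ⟨cellNN_zero, cellNN_zero⟩
    | 1 =>
      refine ⟨?_, ?_⟩
      · exact cellNN_bshift _ _ (hw _) cellNN_zero
      · intro b hb; simp [rowF, bstep] at hb
    | (m + 2) =>
      have i1 := ih (m + 1) (by omega)
      have i0 := ih m (by omega)
      simp only [rowF, bstep]
      refine ⟨?_, ?_⟩
      · exact cellNN_bmerge _ _ (cellNN_bshift _ _ (hw _) i1.2) (cellNN_bshift _ _ (hw _) i0.1)
      · exact cellNN_bmerge _ _ (fun b hb => by cases hb) (cellNN_bshift _ _ (hw _) i0.1)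

theorem prefix_nonneg (stair steps : List Int) (h : ∀ x ∈ stair, 0 ≤ x) :
    0 ≤ ((steps.map (fun i => idx0 stair i)).sum) := by
  apply List.sum_nonneg
  intro x hx
  obtain ⟨i, -, rfl⟩ := List.mem_map.mp hx
  exact idx0_nonneg stair h i

theorem evalC_collapse (P : Int) (c : BCell) (hP : 0 ≤ P) (hc : cellNN c) :
    (match c.1 with
     | some b => if c.2 then max (P + b) 0 else P + b
     | none => (0 : Int))
    = (match c.1 with
       | none => (0 : Int)
       | some b => P + b) := by
  obtain ⟨o, z⟩ := c
  cases o with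
  | none => rfl
  | some v =>
    have := hc v rfl
    cases z
    · simp
    · simp; omega

theorem bshift_ite_proj (p : Prop) [Decidable p] (c d : BCell) (w : Int) :
    (bshift (if p then c else d) w).1 = (if p then c.1 else d.1).map (fun v => w + v) := by
  split_ifs
  · exact (map_add_comm_opt c.1 w).symm
  · exact (map_add_comm_opt d.1 w).symm

theorem dfsC_eq_alt (steps stair : List Int) (now last_num : Int)
    (hnn : now + 2 ≤ last_num → ∀ x ∈ stair, 0 ≤ x) :
    dfsC steps stair now last_num = dfs_alt steps stair now last_num := by
  by_cases h1 : now = last_num - 1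
  · rw [dfsC, dfs_alt, if_pos h1, if_pos h1]
  by_cases h2 : last_num ≤ now
  · rw [dfsC, if_neg h1, if_pos h2, dfs_alt, if_neg h1]
    have hA : ¬ (now + 2 ≤ last_num - 1) := by omega
    have hB : ¬ ((¬ (2 ≤ steps.length ∧ now + 1 - tail1 steps = tail1 steps - tail2 steps ∧
        tail1 steps - tail2 steps = 1)) ∧ now + 1 ≤ last_num - 1) := fun h => absurd h.2 (by omega)
    simp only [if_neg hA, if_neg hB]
  have hnow : now ≤ last_num - 2 := by omega
  have hs : ∀ x ∈ stair, 0 ≤ x := hnn (by omega)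
  have hle1 : now + 1 ≤ last_num - 1 := by omega
  set f : Nat := (last_num - 2 - now).toNat with hf
  have hb := bloop_eq stair last_num f 0
  rw [show last_num - 1 - (((0 : Nat) : Int) + 1) = last_num - 2 by push_cast; ring,
      show rowF stair last_num 0 = ((some 0, false), (some 0, false)) from rfl] at hb
  norm_num at hb
  have hb2 := bloop2_eq stair last_num f 0
  rw [show last_num - 1 - (((0 : Nat) : Int) + 1) = last_num - 2 by push_cast; ring] at hb2
  norm_num [show rowF stair last_num 0 = ((some 0, false), (some 0, false)) from rfl] at hb2
  rw [dfsC, if_neg h1, if_neg h2, dfs_alt, if_neg h1]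
  simp only [← hf, hb, hb2, and_iff_left hle1]
  have hPnn : 0 ≤ ((steps.map (fun i => idx0 stair i)).sum) := prefix_nonneg stair steps hs
  have hrow := rowF_NN stair last_num hs
  have hcast : ((f : Nat) : Int) = last_num - 2 - now := Int.toNat_of_nonneg (by omega)
  by_cases hf0 : f = 0
  · have h2c : ¬ (now + 2 ≤ last_num - 1) := by omega
    simp only [hf0, reduceIte, if_neg h2c]
    by_cases hGc : (2 ≤ steps.length ∧ now + 1 - tail1 steps = tail1 steps - tail2 steps ∧
        tail1 steps - tail2 steps = 1)
    · simp only [if_pos hGc, if_neg (not_not_intro hGc)]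
    · simp only [if_neg hGc, if_pos hGc]
      have hc : cellNN (bshift (if steps ≠ [] ∧ tail1 steps = now
            then (rowF stair last_num 0).2 else (rowF stair last_num 0).1)
          (idx0 stair (now + 1))) := by
        apply cellNN_bshift _ _ (idx0_nonneg stair hs _)
        split_ifs
        · exact (hrow 0).2
        · exact (hrow 0).1
      rw [evalC_collapse _ _ hPnn hc, bshift_ite_proj]
  · have h2c : now + 2 ≤ last_num - 1 := by omega
    simp only [if_neg hf0, if_pos h2c]
    set r2 : BRow := rowF stair last_num (f - 1) with hr2
    set r1 : BRow := rowF stair last_num f with hr1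
    set G : Prop := (2 ≤ steps.length ∧ now + 1 - tail1 steps = tail1 steps - tail2 steps ∧
        tail1 steps - tail2 steps = 1) with hG
    set c0 : BCell := if G then ((none : Option Int), true)
        else bshift (if steps ≠ [] ∧ tail1 steps = now then r1.2 else r1.1) (idx0 stair (now + 1)) with hc0
    have hc0NN : cellNN c0 := by
      rw [hc0]; split_ifs with hGc hsc
      · intro b hb; cases hb
      · exact cellNN_bshift _ _ (idx0_nonneg stair hs _) (hrow f).2
      · exact cellNN_bshift _ _ (idx0_nonneg stair hs _) (hrow f).1
    have hcNN : cellNN (bmerge c0 (bshift (if steps ≠ [] ∧ tail1 steps = now + 1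
        then r2.2 else r2.1) (idx0 stair (now + 2)))) := by
      apply cellNN_bmerge _ _ hc0NN
      apply cellNN_bshift _ _ (idx0_nonneg stair hs _)
      split_ifs
      · exact (hrow (f - 1)).2
      · exact (hrow (f - 1)).1
    rw [evalC_collapse _ _ hPnn hcNN, proj_bmerge]
    have hproj0 : c0.1 = (if G then none
        else (if steps ≠ [] ∧ tail1 steps = now then r1.2.1 else r1.1.1).map
          (fun v => idx0 stair (now + 1) + v)) := by
      rw [hc0]
      split_ifs
      · rfl
      · exact (map_add_comm_opt _ _).symm
      · exact (map_add_comm_opt _ _).symm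
    rw [hproj0, bshift_ite_proj]
    simp only [hG, ite_not]

-- ===== VERDICT (by name: the statement is the Claim_ definition above) =====
theorem dfs_spec : Claim_equal_dfs := by
  intro steps stair now last_num _ hpre
  unfold Spec_dfs
  exact (dfs_eq_dfsC steps stair now last_num).trans
    (dfsC_eq_alt steps stair now last_num (fun h => ((hpre (by omega)).2 h).2))
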